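-- pv_equiv track=rewrite | github.com/johnblackford/agent | agent/utils.py | build_path_from_parts
-- ===== SOURCE A (Python) =====
-- def build_path_from_parts(path_parts, partial_path_part_len):
--     """Build a sub-path from the provided path parts"""
--     built_path = ""
--     append_param = False
--     built_path_part_count = 0
--
--     if isinstance(path_parts, list):
--         if partial_path_part_len >= len(path_parts):
--             partial_path_part_len = len(path_parts) - 1
--             append_param = True
--
--         # We only want the path to the specified level
--         if partial_path_part_len > 0:
--             for part in path_parts:
--                 built_path_part_count += 1
--                 built_path = built_path + part + "."
--                 if built_path_part_count == partial_path_part_len: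
--                     break
--
--         if append_param:
--             built_path += path_parts[len(path_parts) - 1]
--
--     return built_path
-- ===== SOURCE B (Python) =====
-- def build_path_from_parts(path_parts, partial_path_part_len):
--     """Build a sub-path from the provided path parts"""
--     if not isinstance(path_parts, list):
--         return ""
--     n = len(path_parts)
--     if partial_path_part_len >= n:
--         # full dotted path, assembled back to front
--         out = path_parts[n - 1]
--         for part in reversed(path_parts[:n - 1]):
--             out = part + "." + out
--         return out
--     if partial_path_part_len <= 0:
--         return ""
--     # partial path (trailing dot), assembled back to front
--     out = ""
--     for part in reversed(path_parts[:partial_path_part_len]):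
--         out = part + "." + out
--     return out
-- ===== Notes on version B (the rewrite author's own statement) =====
-- stated objective: alternative
-- what changed: Replaces A's forward accumulating loop with counter/break and append_param flag by a branch on n = len(path_parts) and back-to-front construction: the result is built by prepending 'part + "."' while walking the relevant parts in reverse, seeded with the last element for the full path and with '' for the partial path; Pre_ excludes ([], k>=0), where both A and B raise IndexError.
import Mathlib
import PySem

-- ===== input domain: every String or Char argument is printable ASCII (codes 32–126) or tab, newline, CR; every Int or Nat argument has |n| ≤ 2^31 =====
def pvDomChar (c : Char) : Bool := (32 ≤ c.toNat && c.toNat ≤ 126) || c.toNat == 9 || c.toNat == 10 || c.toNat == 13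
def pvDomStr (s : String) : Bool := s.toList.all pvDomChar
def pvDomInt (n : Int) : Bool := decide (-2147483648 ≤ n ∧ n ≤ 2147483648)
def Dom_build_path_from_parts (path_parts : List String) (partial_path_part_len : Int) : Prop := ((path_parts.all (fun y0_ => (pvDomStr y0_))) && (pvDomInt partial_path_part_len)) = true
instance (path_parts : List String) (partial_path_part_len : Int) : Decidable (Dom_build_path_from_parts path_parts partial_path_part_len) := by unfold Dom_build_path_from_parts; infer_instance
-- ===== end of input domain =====

-- B replaces A's forward counter/flag accumulation loop by a branch on the length and
-- back-to-front construction (prepending while walking the relevant parts in reverse);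
-- Pre_ excludes ([], k≥0), where both Pythons raise IndexError.

-- ===== PORT A =====
-- the 'for part in path_parts: … break' loop of A, with its counter and accumulator
def aLoop : List String → Int → Int → String → String
  | [], _, _, acc => acc
  | p :: rest, cnt, k, acc =>
    let cnt' := cnt + 1
    let acc' := acc ++ p ++ "."
    if cnt' = k then acc' else aLoop rest cnt' k acc'

-- the isinstance(path_parts, list) test is always true under the type convention
def build_path_from_parts (path_parts : List String) (partial_path_part_len : Int) : String :=
  let n : Int := path_parts.length
  let append_param : Bool := partial_path_part_len ≥ n
  let ppl : Int := if partial_path_part_len ≥ n then n - 1 else partial_path_part_len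
  let built_path : String := if ppl > 0 then aLoop path_parts 0 ppl "" else ""
  if append_param then
    -- path_parts[len(path_parts)-1]: none (IndexError) exactly on the empty list, excluded by Pre_
    built_path ++ (PySem.List.pyGet? path_parts (n - 1)).getD ""
  else built_path

-- ===== PORT B =====
def build_path_from_parts_alt (path_parts : List String) (partial_path_part_len : Int) : String :=
  let n : Int := path_parts.length
  if partial_path_part_len ≥ n then
    -- path_parts[n-1]: IndexError exactly on the empty list, excluded by Pre_
    let out := (PySem.List.pyGet? path_parts (n - 1)).getD ""
    -- for part in reversed(path_parts[:n-1]): out = part + "." + out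
    ((PySem.List.slice path_parts none (some (n - 1))).reverse).foldl
      (fun out part => part ++ "." ++ out) out
  else if partial_path_part_len ≤ 0 then ""
  else
    -- for part in reversed(path_parts[:partial_path_part_len]): out = part + "." + out
    ((PySem.List.slice path_parts none (some partial_path_part_len)).reverse).foldl
      (fun out part => part ++ "." ++ out) ""

-- ===== PRECONDITION & SPEC =====
-- Pre_ excludes only ([], k) with k ≥ 0, where A raises IndexError on path_parts[-1]
def Pre_build_path_from_parts (path_parts : List String) (partial_path_part_len : Int) : Prop :=
  ¬ (path_parts = [] ∧ 0 ≤ partial_path_part_len)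
instance (path_parts : List String) (partial_path_part_len : Int) : Decidable (Pre_build_path_from_parts path_parts partial_path_part_len) := by unfold Pre_build_path_from_parts; infer_instance

def pvWitness_build_path_from_parts : List String × Int := (["a", "b", "c"], 2)

def Spec_build_path_from_parts (path_parts : List String) (partial_path_part_len : Int) (out : String) : Prop := out = build_path_from_parts_alt path_parts partial_path_part_len
instance (path_parts : List String) (partial_path_part_len : Int) (out : String) : Decidable (Spec_build_path_from_parts path_parts partial_path_part_len out) := by unfold Spec_build_path_from_parts; infer_instance

-- ===== CLAIM (what is proved, stated in full; the proofs are below) =====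
def Claim_equal_build_path_from_parts : Prop := ∀ (path_parts : List String) (partial_path_part_len : Int), Dom_build_path_from_parts path_parts partial_path_part_len → Pre_build_path_from_parts path_parts partial_path_part_len → Spec_build_path_from_parts path_parts partial_path_part_len (build_path_from_parts path_parts partial_path_part_len)

-- ===== LEMMAS AND PROOFS =====

-- B's prepend loop, characterised: folding over xs.reverse prepending "p." blocks
-- yields the blocks of xs followed by the seed
theorem bFoldr_eq : ∀ (xs : List String) (x : String),
    (List.foldr (fun part out => part ++ "." ++ out) x xs).toList
      = ((xs.map (fun p => p.toList ++ ['.'])).flatten) ++ x.toList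
  | [], x => by simp
  | p :: rest, x => by
      simp [bFoldr_eq rest x, String.toList_append]

theorem bLoop_eq (xs : List String) (x : String) :
    (xs.reverse.foldl (fun out part => part ++ "." ++ out) x).toList
      = ((xs.map (fun p => p.toList ++ ['.'])).flatten) ++ x.toList := by
  rw [List.foldl_reverse]; exact bFoldr_eq xs x

-- A's loop, characterised: starting at counter c with bound c + m (m > 0), it
-- appends the first m parts, each followed by "."
theorem aLoop_eq : ∀ (xs : List String) (c : Int) (m : Nat) (acc : String), 0 < m →
    (aLoop xs c (c + (m : Int)) acc).toList
      = acc.toList ++ ((xs.take m).map (fun p => p.toList ++ ['.'])).flatten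
  | [], c, m, acc, _ => by simp [aLoop]
  | p :: rest, c, m, acc, hm => by
      by_cases h1 : m = 1
      · subst h1
        simp [aLoop, String.toList_append]
      · have hne : ¬ (c + 1 = c + (m : Int)) := by omega
        have hrec := aLoop_eq rest (c + 1) (m - 1) (acc ++ p ++ ".") (by omega)
        have hcast : (c + 1) + ((m - 1 : Nat) : Int) = c + (m : Int) := by
          push_cast [Nat.cast_sub (by omega : 1 ≤ m)]; ring
        rw [hcast] at hrec
        have htake : (p :: rest).take m = p :: rest.take (m - 1) := by
          cases m with
          | zero => omega
          | succ k => simp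
        rw [htake]
        simp only [aLoop, if_neg hne, hrec, String.toList_append,
          List.map_cons, List.flatten_cons]
        simp

theorem main_eq (path_parts : List String) (k : Int)
    (hpre : Pre_build_path_from_parts path_parts k) :
    build_path_from_parts path_parts k = build_path_from_parts_alt path_parts k := by
  unfold build_path_from_parts build_path_from_parts_alt
  by_cases hge : k ≥ (path_parts.length : Int)
  · have hne : path_parts ≠ [] := by
      intro h; subst h; exact hpre ⟨rfl, by simpa using hge⟩
    have hlen : 1 ≤ path_parts.length := List.length_pos_iff.mpr hne
    simp only [hge, if_pos, decide_true]
    rw [← String.toList_inj]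
    have hsl : PySem.List.slice path_parts none (some ((path_parts.length : Int) - 1))
        = path_parts.dropLast := by
      rw [show ((path_parts.length : Int) - 1) = ((path_parts.length - 1 : Nat) : Int) by
        push_cast [Nat.cast_sub hlen]; ring]
      rw [PySem.List.slice_to path_parts (by positivity)]
      simp [List.dropLast_eq_take]
    rw [bLoop_eq, hsl]
    by_cases h1 : path_parts.length = 1
    · -- single element: A's loop is skipped, B's fold is over []
      rw [if_neg (show ¬ ((path_parts.length : Int) - 1 > 0) by omega)]
      obtain ⟨x, hx⟩ : ∃ x, path_parts = [x] := by
        cases path_parts with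
        | nil => simp at h1
        | cons a t => cases t with
          | nil => exact ⟨a, rfl⟩
          | cons b t' => simp at h1
      subst hx; simp
    · have h2 : 2 ≤ path_parts.length := by omega
      rw [if_pos (show ((path_parts.length : Int) - 1 > 0) by omega)]
      have hl := aLoop_eq path_parts 0 (path_parts.length - 1) "" (by omega)
      rw [show (0 : Int) + ((path_parts.length - 1 : Nat) : Int) = (path_parts.length : Int) - 1 by
        push_cast [Nat.cast_sub hlen]; ring] at hl
      rw [String.toList_append, hl, List.dropLast_eq_take]
      simp
  · simp only [if_neg hge]
    rw [if_neg (show ¬ (decide (k ≥ (path_parts.length : Int)) = true) by simp [hge])]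
    by_cases hk : k > 0
    · rw [if_pos hk, if_neg (by omega : ¬ k ≤ 0)]
      rw [← String.toList_inj, bLoop_eq]
      have hl := aLoop_eq path_parts 0 k.toNat "" (by omega)
      rw [show (0 : Int) + (k.toNat : Int) = k by omega] at hl
      rw [hl, PySem.List.slice_to path_parts (by omega : (0:Int) ≤ k)]
      simp
    · rw [if_neg hk, if_pos (by omega : k ≤ 0)]

-- ===== VERDICT (by name: the statement is the Claim_ definition above) =====
theorem build_path_from_parts_spec : Claim_equal_build_path_from_parts := by
  intro pp k _ hpre
  unfold Spec_build_path_from_parts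
  exact main_eq pp k hpre
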